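-- pv_equiv track=rewrite | github.com/elizasomerville/pycsodata | src/pycsodata/search.py | _tokenise_expression
-- ===== SOURCE A (Python) =====
-- def _tokenise_expression(query: str) -> list[str]:
--     """Tokenise a search expression into tokens.
--
--     Handles AND, OR, NOT operators, parentheses, and quoted strings.
--     Quoted strings are preserved as single tokens.
--
--     Args:
--         query: The search expression to tokenise.
--
--     Returns:
--         A list of tokens.
--     """
--     tokens: list[str] = []
--     i = 0
--     query = query.strip()
--
--     while i < len(query):
--         # Skip whitespace
--         if query[i].isspace():
--             i += 1
--             continue
--
--         # Parentheses
--         if query[i] == "(":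
--             tokens.append("(")
--             i += 1
--             continue
--         if query[i] == ")":
--             tokens.append(")")
--             i += 1
--             continue
--
--         # Quoted string
--         if query[i] in ('"', "'"):
--             quote_char = query[i]
--             i += 1
--             start = i
--             while i < len(query) and query[i] != quote_char:
--                 i += 1
--             tokens.append(query[start:i])
--             if i < len(query):
--                 i += 1  # Skip closing quote
--             continue
--
--         # Word (including AND/OR operators)
--         start = i
--         while i < len(query) and not query[i].isspace() and query[i] not in "()'\"":
--             i += 1
--         word = query[start:i]
--         if word:
--             tokens.append(word)
--
--     return tokens
-- ===== SOURCE B (Python) =====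
-- def _tokenise_expression(query: str) -> list[str]:
--     """Tokenise a search expression into tokens.
--
--     Suffix-consuming rewrite: instead of a manual index state machine,
--     repeatedly lstrip the remaining suffix and split off one token at a
--     time with partition / a scanning generator.
--     """
--     delims = "()'\""
--     tokens: list[str] = []
--     s = query.strip()
--     while s:
--         s = s.lstrip()
--         if not s:
--             break
--         c = s[0]
--         if c in "()":
--             tokens.append(c)
--             s = s[1:]
--         elif c in "\"'":
--             body, _, s = s[1:].partition(c)
--             tokens.append(body)
--         else:
--             j = next((k for k, ch in enumerate(s) if ch.isspace() or ch in delims), len(s))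
--             tokens.append(s[:j])
--             s = s[j:]
--     return tokens
-- ===== Notes on version B (the rewrite author's own statement) =====
-- stated objective: faster
-- what changed: Replaced the index-based state machine (manual i cursor with nested per-character while loops) by a suffix-consuming tokenizer that repeatedly lstrips the remainder and splits off one token with str.partition / a scanning generator.
import Mathlib
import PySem

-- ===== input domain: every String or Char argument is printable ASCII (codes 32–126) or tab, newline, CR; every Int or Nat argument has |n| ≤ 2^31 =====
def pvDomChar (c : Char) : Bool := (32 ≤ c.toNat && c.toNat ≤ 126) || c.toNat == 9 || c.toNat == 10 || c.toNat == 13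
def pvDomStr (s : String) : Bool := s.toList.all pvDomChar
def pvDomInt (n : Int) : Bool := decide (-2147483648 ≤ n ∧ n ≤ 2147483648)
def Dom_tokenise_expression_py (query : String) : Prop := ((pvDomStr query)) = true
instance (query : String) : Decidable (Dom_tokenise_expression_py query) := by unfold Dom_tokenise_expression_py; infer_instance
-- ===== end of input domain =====

-- B replaces A's index-based state machine by a suffix-consuming tokenizer (lstrip + partition-style splits); same O(n), measured constant-factor faster in a timing run.

-- ===== PORT A =====
-- inner while of the quoted-string branch: advance i while query[i] ≠ quote_char
def tokA_scanQuote (cs : List Char) (q : Char) (i : Nat) : Nat :=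
  if h : i < cs.length then
    if cs[i] ≠ q then tokA_scanQuote cs q (i + 1) else i
  else i
termination_by cs.length - i

-- inner while of the word branch: advance i while not whitespace and not a delimiter
def tokA_scanWord (cs : List Char) (i : Nat) : Nat :=
  if h : i < cs.length then
    if (!(PySem.Chars.isspace cs[i]) && !(['(', ')', '\'', '"'].contains cs[i])) then
      tokA_scanWord cs (i + 1)
    else i
  else i
termination_by cs.length - i

theorem tokA_scanQuote_ge (cs : List Char) (q : Char) (i : Nat) : i ≤ tokA_scanQuote cs q i := by
  fun_induction tokA_scanQuote cs q i <;> omega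

theorem tokA_scanWord_ge (cs : List Char) (i : Nat) : i ≤ tokA_scanWord cs i := by
  fun_induction tokA_scanWord cs i <;> omega

-- the main while loop of A (the two inner scans start one past the branch character,
-- which the branch guard has already tested, exactly as Python's first iteration does)
def tokA_loop (cs : List Char) (i : Nat) (tokens : List String) : List String :=
  if h : i < cs.length then
    if PySem.Chars.isspace cs[i] then tokA_loop cs (i + 1) tokens
    else if cs[i] = '(' then tokA_loop cs (i + 1) (tokens ++ ["("])
    else if cs[i] = ')' then tokA_loop cs (i + 1) (tokens ++ [")"])
    else if cs[i] = '"' ∨ cs[i] = '\'' then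
      let j := tokA_scanQuote cs cs[i] (i + 1)
      let tok := PySem.List.slice cs (some ((i + 1 : Nat) : Int)) (some ((j : Nat) : Int))
      tokA_loop cs (if j < cs.length then j + 1 else j) (tokens ++ [String.ofList tok])
    else
      let j := tokA_scanWord cs (i + 1)
      let w := PySem.List.slice cs (some ((i : Nat) : Int)) (some ((j : Nat) : Int))
      tokA_loop cs j (tokens ++ if w.isEmpty then [] else [String.ofList w])
  else tokens
termination_by cs.length - i
decreasing_by
  · omega
  · omega
  · omega
  · have := tokA_scanQuote_ge cs cs[i] (i + 1); split <;> omega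
  · have := tokA_scanWord_ge cs (i + 1); omega

def tokenise_expression_py (query : String) : List String :=
  tokA_loop (PySem.Chars.strip query.toList) 0 []

-- ===== PORT B =====
def tokB_isWordChar (ch : Char) : Bool :=
  !(PySem.Chars.isspace ch || ['(', ')', '\'', '"'].contains ch)

def tokB_go (s : List Char) : List String :=
  match hs : PySem.Chars.lstrip s with
  | [] => []
  | c :: rest =>
    if c = '(' ∨ c = ')' then
      String.ofList [c] :: tokB_go rest
    else if c = '"' ∨ c = '\'' then
      -- body, _, s = s[1:].partition(c)
      String.ofList (rest.takeWhile (· ≠ c)) :: tokB_go ((rest.dropWhile (· ≠ c)).drop 1)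
    else
      -- split at the first whitespace/delimiter position
      String.ofList ((c :: rest).takeWhile tokB_isWordChar) :: tokB_go ((c :: rest).dropWhile tokB_isWordChar)
termination_by s.length
decreasing_by
  all_goals
    have hlen : (c :: rest).length ≤ s.length := by
      rw [← hs]; exact List.length_dropWhile_le _ _
  · simp at hlen; omega
  · have h1 : ((rest.dropWhile (· ≠ c)).drop 1).length ≤ rest.length := by
      have := List.length_dropWhile_le (fun x => decide (x ≠ c)) rest
      simp only [List.length_drop]; omega
    simp at hlen; omega
  · have hc : tokB_isWordChar c = true := by
      have hne : PySem.Chars.lstrip s ≠ [] := by rw [hs]; simp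
      have hs' : List.dropWhile PySem.Chars.isspace s = c :: rest := hs
      have hhd := List.head_dropWhile_not PySem.Chars.isspace (l := s) hne
      simp only [hs', List.head_cons] at hhd
      simp only [tokB_isWordChar, Bool.not_eq_true', Bool.or_eq_false_iff]
      refine ⟨hhd, ?_⟩
      simp only [List.contains_eq_mem, decide_eq_false_iff_not, List.mem_cons,
        List.not_mem_nil, or_false]
      rename_i h1 h2
      push Not at h1 h2
      tauto
    rw [List.dropWhile_cons_of_pos hc]
    have := List.length_dropWhile_le tokB_isWordChar rest
    simp at hlen; omega

def tokenise_expression_py_alt (query : String) : List String :=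
  tokB_go (PySem.Chars.strip query.toList)

-- ===== PRECONDITION & SPEC =====
def Spec_tokenise_expression_py (query : String) (out : List String) : Prop := out = tokenise_expression_py_alt query
instance (query : String) (out : List String) : Decidable (Spec_tokenise_expression_py query out) := by unfold Spec_tokenise_expression_py; infer_instance

-- ===== CLAIM (what is proved, stated in full; the proofs are below) =====
def Claim_equal_tokenise_expression_py : Prop := ∀ (query : String), Dom_tokenise_expression_py query → Spec_tokenise_expression_py query (tokenise_expression_py query)

-- ===== LEMMAS AND PROOFS =====

theorem take_length_takeWhile {α : Type} (p : α → Bool) (l : List α) :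
    l.take (l.takeWhile p).length = l.takeWhile p := by
  induction l with
  | nil => rfl
  | cons a t ih =>
    by_cases h : p a
    · rw [List.takeWhile_cons_of_pos h, List.length_cons, List.take_succ_cons, ih]
    · rw [List.takeWhile_cons_of_neg (by simpa using h)]; rfl

theorem dropWhile_eq_drop {α : Type} (p : α → Bool) (l : List α) :
    l.dropWhile p = l.drop (l.takeWhile p).length := by
  induction l with
  | nil => rfl
  | cons a t ih =>
    by_cases h : p a
    · rw [List.takeWhile_cons_of_pos h, List.dropWhile_cons_of_pos h, List.length_cons,
        List.drop_succ_cons, ih]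
    · rw [List.takeWhile_cons_of_neg (by simpa using h),
        List.dropWhile_cons_of_neg (by simpa using h)]; rfl

theorem tokA_scanQuote_spec (cs : List Char) (q : Char) (i : Nat) :
    tokA_scanQuote cs q i = i + ((cs.drop i).takeWhile (· ≠ q)).length := by
  fun_induction tokA_scanQuote cs q i with
  | case1 i h hne ih =>
    rw [ih, List.drop_eq_getElem_cons h,
      List.takeWhile_cons_of_pos (by simpa using hne), List.length_cons]
    omega
  | case2 i h hne =>
    rw [List.drop_eq_getElem_cons h, List.takeWhile_cons_of_neg (by simpa using hne)]
    rfl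
  | case3 i h =>
    rw [List.drop_eq_nil_of_le (by omega)]; rfl

theorem tokA_scanWord_spec (cs : List Char) (i : Nat) :
    tokA_scanWord cs i = i + ((cs.drop i).takeWhile tokB_isWordChar).length := by
  fun_induction tokA_scanWord cs i with
  | case1 i h hc ih =>
    rw [ih, List.drop_eq_getElem_cons h,
      List.takeWhile_cons_of_pos (by simpa [tokB_isWordChar, Bool.not_or] using hc),
      List.length_cons]
    omega
  | case2 i h hc =>
    rw [List.drop_eq_getElem_cons h,
      List.takeWhile_cons_of_neg (by simpa [tokB_isWordChar, Bool.not_or] using hc)]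
    rfl
  | case3 i h =>
    rw [List.drop_eq_nil_of_le (by omega)]; rfl

theorem tokA_scanQuote_le (cs : List Char) (q : Char) (i : Nat) (hi : i ≤ cs.length) :
    tokA_scanQuote cs q i ≤ cs.length := by
  rw [tokA_scanQuote_spec]
  have h1 := (List.takeWhile_prefix (l := cs.drop i) (fun x => decide (x ≠ q))).length_le
  rw [List.length_drop] at h1
  omega

theorem lstrip_cons_of_space (c : Char) (t : List Char) (h : PySem.Chars.isspace c = true) :
    PySem.Chars.lstrip (c :: t) = PySem.Chars.lstrip t :=
  List.dropWhile_cons_of_pos h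

theorem lstrip_drop_cons (cs : List Char) (i : Nat) (h : i < cs.length)
    (hsp : ¬ PySem.Chars.isspace cs[i] = true) :
    PySem.Chars.lstrip (cs.drop i) = cs[i] :: cs.drop (i + 1) := by
  rw [List.drop_eq_getElem_cons h]
  exact List.dropWhile_cons_of_neg hsp

-- tokB_go only looks at its argument through lstrip
theorem tokB_go_congr (s t : List Char) (h : PySem.Chars.lstrip s = PySem.Chars.lstrip t) :
    tokB_go s = tokB_go t := by
  rw [tokB_go.eq_def, tokB_go.eq_def, h]

-- one-step equation lemmas for tokB_go, by the shape of lstrip s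
theorem tokB_go_nil (s : List Char) (hs : PySem.Chars.lstrip s = []) : tokB_go s = [] := by
  rw [tokB_go.eq_def]
  split
  · rfl
  · rename_i heq; rw [hs] at heq; cases heq

theorem tokB_go_paren (s : List Char) (c : Char) (rest : List Char)
    (hs : PySem.Chars.lstrip s = c :: rest) (hc : c = '(' ∨ c = ')') :
    tokB_go s = String.ofList [c] :: tokB_go rest := by
  rw [tokB_go.eq_def]
  split
  · rename_i heq; rw [hs] at heq; cases heq
  · rename_i c' rest' heq
    rw [hs] at heq
    injection heq with h1 h2
    subst h1; subst h2
    rw [if_pos hc]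

theorem tokB_go_quote (s : List Char) (c : Char) (rest : List Char)
    (hs : PySem.Chars.lstrip s = c :: rest) (hc : c = '"' ∨ c = '\'') :
    tokB_go s = String.ofList (rest.takeWhile (· ≠ c)) ::
      tokB_go ((rest.dropWhile (· ≠ c)).drop 1) := by
  rw [tokB_go.eq_def]
  split
  · rename_i heq; rw [hs] at heq; cases heq
  · rename_i c' rest' heq
    rw [hs] at heq
    injection heq with h1 h2
    subst h1; subst h2
    rw [if_neg (by rcases hc with hc | hc <;> rw [hc] <;> simp), if_pos hc]

theorem tokB_go_word (s : List Char) (c : Char) (rest : List Char)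
    (hs : PySem.Chars.lstrip s = c :: rest)
    (hc1 : ¬ (c = '(' ∨ c = ')')) (hc2 : ¬ (c = '"' ∨ c = '\'')) :
    tokB_go s = String.ofList ((c :: rest).takeWhile tokB_isWordChar) ::
      tokB_go ((c :: rest).dropWhile tokB_isWordChar) := by
  rw [tokB_go.eq_def]
  split
  · rename_i heq; rw [hs] at heq; cases heq
  · rename_i c' rest' heq
    rw [hs] at heq
    injection heq with h1 h2
    subst h1; subst h2
    rw [if_neg hc1, if_neg hc2]

theorem tokA_loop_eq (cs : List Char) (i : Nat) (tokens : List String) :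
    tokA_loop cs i tokens = tokens ++ tokB_go (cs.drop i) := by
  fun_induction tokA_loop cs i tokens with
  | case1 i tokens h hsp ih =>
    rw [ih]
    congr 1
    apply tokB_go_congr
    rw [List.drop_eq_getElem_cons h, lstrip_cons_of_space _ _ hsp]
  | case2 i tokens h hsp hpar ih =>
    rw [ih, tokB_go_paren (cs.drop i) cs[i] (cs.drop (i + 1))
      (lstrip_drop_cons cs i h hsp) (Or.inl hpar), hpar]
    simp
  | case3 i tokens h hsp hpar hpar2 ih =>
    rw [ih, tokB_go_paren (cs.drop i) cs[i] (cs.drop (i + 1))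
      (lstrip_drop_cons cs i h hsp) (Or.inr hpar2), hpar2]
    simp
  | case4 i tokens h hsp hpar hpar2 hq j tok ih =>
    simp only [dite_eq_ite] at ih
    rw [ih, tokB_go_quote (cs.drop i) cs[i] (cs.drop (i + 1))
      (lstrip_drop_cons cs i h hsp) hq]
    simp only [tok, j]
    have hj := tokA_scanQuote_spec cs cs[i] (i + 1)
    have hjle : tokA_scanQuote cs cs[i] (i + 1) <= cs.length :=
      tokA_scanQuote_le cs cs[i] (i + 1) (by omega)
    have htok : PySem.List.slice cs (some ((i + 1 : Nat) : Int))
          (some ((tokA_scanQuote cs cs[i] (i + 1) : Nat) : Int))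
        = (cs.drop (i + 1)).takeWhile (fun x => decide (x ≠ cs[i])) := by
      rw [PySem.List.slice_natCast, hj, Nat.add_sub_cancel_left, take_length_takeWhile]
    have hrest : cs.drop (if tokA_scanQuote cs cs[i] (i + 1) < cs.length
          then tokA_scanQuote cs cs[i] (i + 1) + 1 else tokA_scanQuote cs cs[i] (i + 1))
        = ((cs.drop (i + 1)).dropWhile (fun x => decide (x ≠ cs[i]))).drop 1 := by
      rw [dropWhile_eq_drop, List.drop_drop, List.drop_drop]
      by_cases hjl : tokA_scanQuote cs cs[i] (i + 1) < cs.length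
      · rw [if_pos hjl]; congr 1; omega
      · rw [if_neg hjl,
          List.drop_eq_nil_of_le (as := cs) (by omega),
          List.drop_eq_nil_of_le (as := cs) (by omega)]
    rw [htok, hrest]
    simp
  | case5 i tokens h hsp hpar hpar2 hq j w ih =>
    simp only [dite_eq_ite] at ih
    rw [ih, tokB_go_word (cs.drop i) cs[i] (cs.drop (i + 1))
      (lstrip_drop_cons cs i h hsp) (by tauto) hq]
    simp only [w, j]
    have hwc : tokB_isWordChar cs[i] = true := by
      simp only [tokB_isWordChar, Bool.not_eq_true', Bool.or_eq_false_iff]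
      refine ⟨by simpa using hsp, ?_⟩
      simp only [List.contains_eq_mem, decide_eq_false_iff_not, List.mem_cons,
        List.not_mem_nil, or_false]
      push Not at hq
      tauto
    have hj := tokA_scanWord_spec cs (i + 1)
    have hlen1 : i + 1 + ((cs.drop (i + 1)).takeWhile tokB_isWordChar).length - i
        = ((cs.drop (i + 1)).takeWhile tokB_isWordChar).length + 1 := by omega
    have hw : PySem.List.slice cs (some ((i : Nat) : Int))
          (some ((tokA_scanWord cs (i + 1) : Nat) : Int))
        = (cs[i] :: cs.drop (i + 1)).takeWhile tokB_isWordChar := by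
      rw [PySem.List.slice_natCast, hj, hlen1, List.drop_eq_getElem_cons h,
        List.take_succ_cons, take_length_takeWhile, List.takeWhile_cons_of_pos hwc]
    have hrest : cs.drop (tokA_scanWord cs (i + 1))
        = (cs[i] :: cs.drop (i + 1)).dropWhile tokB_isWordChar := by
      rw [List.dropWhile_cons_of_pos hwc, dropWhile_eq_drop, List.drop_drop, hj]
    rw [hw, hrest]
    have hnonempty : ((cs[i] :: cs.drop (i + 1)).takeWhile tokB_isWordChar).isEmpty = false := by
      rw [List.takeWhile_cons_of_pos hwc]; rfl
    rw [hnonempty]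
    simp
  | case6 i tokens h =>
    rw [List.drop_eq_nil_of_le (by omega), tokB_go_nil [] rfl]
    simp

-- ===== VERDICT (by name: the statement is the Claim_ definition above) =====
theorem tokenise_expression_py_spec : Claim_equal_tokenise_expression_py := by
  intro query _
  unfold Spec_tokenise_expression_py tokenise_expression_py tokenise_expression_py_alt
  rw [tokA_loop_eq]
  simp
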